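-- pv_equiv track=rewrite | github.com/blasfir/srom-4 | lab-4.py | onbAdd
-- ===== SOURCE A (Python) =====
-- def deleteExtraZeros(A):
--     while A and A[0] == 0:
--         A.pop(0)
--     if not A:
--         return [0]
--     return A
--
-- def onbAdd(A, B):
--     result = []
--     for i in range(len(A)):
--         k = int(A[i]) + int(B[i])
--         n = k % 2
--         result.append(n)
--     result = deleteExtraZeros(result)
--     return result
-- ===== SOURCE B (Python) =====
-- def onbAdd(A, B):
--     result = []
--     started = False
--     for i in range(len(A)):
--         n = (int(A[i]) + int(B[i])) % 2
--         if started or n != 0: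
--             result.append(n)
--             started = True
--     return result if result else [0]
-- ===== Notes on version B (the rewrite author's own statement) =====
-- stated objective: alternative
-- what changed: B fuses the XOR-build and the leading-zero strip into one pass with a 'started' flag, instead of building the full parity list and then post-stripping it with a while/pop loop.
import Mathlib
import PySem

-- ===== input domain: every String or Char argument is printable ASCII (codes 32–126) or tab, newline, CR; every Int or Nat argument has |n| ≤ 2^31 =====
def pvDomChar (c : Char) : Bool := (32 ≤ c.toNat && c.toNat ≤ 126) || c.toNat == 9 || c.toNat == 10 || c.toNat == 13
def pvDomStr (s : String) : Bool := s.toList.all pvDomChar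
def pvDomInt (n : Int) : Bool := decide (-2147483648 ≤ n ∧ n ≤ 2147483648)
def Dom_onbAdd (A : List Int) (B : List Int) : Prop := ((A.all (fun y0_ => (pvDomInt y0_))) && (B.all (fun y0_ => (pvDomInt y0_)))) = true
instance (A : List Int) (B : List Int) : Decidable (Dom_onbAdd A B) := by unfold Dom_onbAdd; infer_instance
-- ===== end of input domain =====

-- B fuses A's two passes (build the full parity list, then strip leading zeros) into one
-- pass with a 'started' flag; return values are proved equal whenever len(B) ≥ len(A).

-- ===== PORT A =====
-- while A and A[0] == 0: A.pop(0); if not A: return [0]; return A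
def deleteExtraZeros : List Int → List Int
  | [] => [0]
  | x :: t => if x = 0 then deleteExtraZeros t else x :: t

def onbAdd (A : List Int) (B : List Int) : List Int :=
  -- result = []; for i in range(len(A)): result.append((int(A[i])+int(B[i])) % 2)
  -- an out-of-range B[i] is an IndexError: the fold state becomes none (excluded by Pre_)
  let res := (PySem.List.pyRange 0 (A.length) 1).foldl
    (fun (acc : Option (List Int)) i =>
      match acc, PySem.List.pyGet? A i, PySem.List.pyGet? B i with
      | some r, some a, some b => some (r ++ [PySem.Int.mod (a + b) 2])
      | _, _, _ => none)
    (some [])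
  match res with
  | some r => deleteExtraZeros r
  | none => []

-- ===== PORT B =====
def onbAdd_alt (A : List Int) (B : List Int) : List Int :=
  -- single pass with a 'started' flag: append n iff started or n != 0
  -- (raise-tracking glue written with Option.bind/elim; none = IndexError, excluded by Pre_)
  let res := (PySem.List.pyRange 0 (A.length) 1).foldl
    (fun (acc : Option (List Int × Bool)) i =>
      acc.bind fun rs =>
        (PySem.List.pyGet? A i).bind fun a =>
          (PySem.List.pyGet? B i).map fun b =>
            let n := PySem.Int.mod (a + b) 2
            if rs.2 || !(n == 0) then (rs.1 ++ [n], true) else rs)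
    (some ([], false))
  res.elim [] (fun rs => if rs.1 = [] then [0] else rs.1)

-- ===== PRECONDITION & SPEC =====
-- A (and B) raise IndexError on B[i] when B is shorter than A; exactly those inputs are excluded.
def Pre_onbAdd (A : List Int) (B : List Int) : Prop := A.length ≤ B.length
instance (A : List Int) (B : List Int) : Decidable (Pre_onbAdd A B) := by unfold Pre_onbAdd; infer_instance
def pvWitness_onbAdd : List Int × List Int := ([0, 1, 1], [1, 1, 0])

def Spec_onbAdd (A : List Int) (B : List Int) (out : List Int) : Prop := out = onbAdd_alt A B
instance (A : List Int) (B : List Int) (out : List Int) : Decidable (Spec_onbAdd A B out) := by unfold Spec_onbAdd; infer_instance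

-- ===== CLAIM (what is proved, stated in full; the proofs are below) =====
def Claim_equal_onbAdd : Prop := ∀ (A : List Int) (B : List Int), Dom_onbAdd A B → Pre_onbAdd A B → Spec_onbAdd A B (onbAdd A B)

-- ===== LEMMAS AND PROOFS =====

-- the parity actually appended at index i (indices are valid under Pre_)
def pvF (A B : List Int) (i : Int) : Int :=
  PySem.Int.mod (A.getD i.toNat 0 + B.getD i.toNat 0) 2

def pvStepA (A B : List Int) (acc : Option (List Int)) (i : Int) : Option (List Int) :=
  match acc, PySem.List.pyGet? A i, PySem.List.pyGet? B i with
  | some r, some a, some b => some (r ++ [PySem.Int.mod (a + b) 2])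
  | _, _, _ => none

def pvStepB (A B : List Int) (acc : Option (List Int × Bool)) (i : Int) : Option (List Int × Bool) :=
  acc.bind fun rs =>
    (PySem.List.pyGet? A i).bind fun a =>
      (PySem.List.pyGet? B i).map fun b =>
        let n := PySem.Int.mod (a + b) 2
        if rs.2 || !(n == 0) then (rs.1 ++ [n], true) else rs

theorem pvStepA_valid (A B : List Int) (r : List Int) (i : Int)
    (h0 : 0 ≤ i) (hA : i < A.length) (hB : i < B.length) :
    pvStepA A B (some r) i = some (r ++ [pvF A B i]) := by
  have hA' : i.toNat < A.length := by omega
  have hB' : i.toNat < B.length := by omega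
  have h1 : PySem.List.pyGet? A i = some (A.getD i.toNat 0) := by
    rw [PySem.List.pyGet?_eq_some_getElem A h0 hA, List.getD_eq_getElem _ _ hA']
  have h2 : PySem.List.pyGet? B i = some (B.getD i.toNat 0) := by
    rw [PySem.List.pyGet?_eq_some_getElem B h0 hB, List.getD_eq_getElem _ _ hB']
  simp [pvStepA, h1, h2, pvF]

theorem pvStepB_valid (A B : List Int) (r : List Int) (s : Bool) (i : Int)
    (h0 : 0 ≤ i) (hA : i < A.length) (hB : i < B.length) :
    pvStepB A B (some (r, s)) i =
      (if s || !(pvF A B i == 0) then some (r ++ [pvF A B i], true) else some (r, s)) := by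
  have hA' : i.toNat < A.length := by omega
  have hB' : i.toNat < B.length := by omega
  have h1 : PySem.List.pyGet? A i = some (A.getD i.toNat 0) := by
    rw [PySem.List.pyGet?_eq_some_getElem A h0 hA, List.getD_eq_getElem _ _ hA']
  have h2 : PySem.List.pyGet? B i = some (B.getD i.toNat 0) := by
    rw [PySem.List.pyGet?_eq_some_getElem B h0 hB, List.getD_eq_getElem _ _ hB']
  simp [pvStepB, h1, h2, pvF]
  split_ifs <;> rfl

theorem pvFoldA (A B : List Int) :
    ∀ (is_ : List Int) (r : List Int),
      (∀ i ∈ is_, 0 ≤ i ∧ i < A.length ∧ i < B.length) →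
      is_.foldl (pvStepA A B) (some r) = some (r ++ is_.map (pvF A B))
  | [], r, _ => by simp
  | i :: t, r, h => by
    have hi := h i (by simp)
    rw [List.foldl_cons, pvStepA_valid A B r i hi.1 hi.2.1 hi.2.2,
        pvFoldA A B t _ (fun j hj => h j (by simp [hj]))]
    simp

theorem pvFoldB_true (A B : List Int) :
    ∀ (is_ : List Int) (r : List Int),
      (∀ i ∈ is_, 0 ≤ i ∧ i < A.length ∧ i < B.length) →
      is_.foldl (pvStepB A B) (some (r, true)) = some (r ++ is_.map (pvF A B), true)
  | [], r, _ => by simp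
  | i :: t, r, h => by
    have hi := h i (by simp)
    rw [List.foldl_cons, pvStepB_valid A B r true i hi.1 hi.2.1 hi.2.2]
    simp only [Bool.true_or, if_true]
    rw [pvFoldB_true A B t _ (fun j hj => h j (by simp [hj]))]
    simp

theorem pvFoldB_false (A B : List Int) :
    ∀ (is_ : List Int),
      (∀ i ∈ is_, 0 ≤ i ∧ i < A.length ∧ i < B.length) →
      ∃ s, is_.foldl (pvStepB A B) (some ([], false)) =
        some ((is_.map (pvF A B)).dropWhile (fun n => n == 0), s)
  | [], _ => ⟨false, by simp⟩
  | i :: t, h => by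
    have hi := h i (by simp)
    have ht : ∀ j ∈ t, 0 ≤ j ∧ j < A.length ∧ j < B.length := fun j hj => h j (by simp [hj])
    rw [List.foldl_cons, pvStepB_valid A B [] false i hi.1 hi.2.1 hi.2.2]
    by_cases hn : pvF A B i = 0
    · refine (pvFoldB_false A B t ht).imp (fun s hs => ?_)
      simp [hn] at hs ⊢
      exact hs
    · refine ⟨true, ?_⟩
      rw [if_pos (by simp [hn]), pvFoldB_true A B t _ ht]
      simp [hn]

theorem pvDelete_eq_dropWhile (l : List Int) :
    deleteExtraZeros l =
      (if l.dropWhile (fun n => n == 0) = [] then [0] else l.dropWhile (fun n => n == 0)) := by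
  induction l with
  | nil => simp [deleteExtraZeros]
  | cons x t ih =>
    rw [List.dropWhile_cons]
    by_cases hx : x = 0
    · simp [deleteExtraZeros, hx, ih]
    · simp [deleteExtraZeros, hx]

-- ===== VERDICT (by name: the statement is the Claim_ definition above) =====
theorem onbAdd_spec : Claim_equal_onbAdd := by
  intro A B _ hpre
  unfold Spec_onbAdd onbAdd onbAdd_alt
  have hmem : ∀ i ∈ PySem.List.pyRange 0 (A.length) 1, 0 ≤ i ∧ i < A.length ∧ i < B.length := by
    intro i hi
    rw [PySem.List.mem_pyRange_one] at hi
    refine ⟨hi.1, hi.2, lt_of_lt_of_le hi.2 (by exact_mod_cast hpre)⟩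
  have hA := pvFoldA A B (PySem.List.pyRange 0 (A.length) 1) [] hmem
  obtain ⟨s, hB⟩ := pvFoldB_false A B (PySem.List.pyRange 0 (A.length) 1) hmem
  simp only [show (fun (acc : Option (List Int)) i =>
      match acc, PySem.List.pyGet? A i, PySem.List.pyGet? B i with
      | some r, some a, some b => some (r ++ [PySem.Int.mod (a + b) 2])
      | _, _, _ => none) = pvStepA A B from rfl,
    show (fun (acc : Option (List Int × Bool)) i =>
      acc.bind fun rs =>
        (PySem.List.pyGet? A i).bind fun a =>
          (PySem.List.pyGet? B i).map fun b =>
            let n := PySem.Int.mod (a + b) 2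
            if rs.2 || !(n == 0) then (rs.1 ++ [n], true) else rs) = pvStepB A B from rfl]
  rw [hA, hB]
  simp only [List.nil_append]
  exact pvDelete_eq_dropWhile _
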